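-- pv_equiv track=rewrite | github.com/hghyhghy/Codechef-Coding-Ninja | T22/6.py | moving_hyphen
-- ===== SOURCE A (Python) =====
-- def moving_hyphen(string):
--
--     if not string:
--
--         return None
--
--     index=0
--     result=[]
--
--     for char in string:
--
--         if char == "-":
--
--
--
--             index += 1
--
--         else:
--
--             result.append(char)
--
--     return "-"*index+"".join(result)
-- ===== SOURCE B (Python) =====
-- def moving_hyphen(string):
--     if not string:
--         return None
--     # Stable sort keyed on the boolean "character differs from a hyphen":
--     # hyphens (key False) move to the front, and stability keeps the
--     # remaining characters in their original relative order.
--     return "".join(sorted(string, key=lambda c: c != "-"))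
-- ===== Notes on version B (the rewrite author's own statement) =====
-- stated objective: alternative
-- what changed: Instead of one manual pass that counts hyphens and collects the remaining characters, B performs a single stable sort of the characters keyed on whether each character is a non-hyphen, so hyphens move to the front while stability preserves the relative order of everything else.
import Mathlib
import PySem

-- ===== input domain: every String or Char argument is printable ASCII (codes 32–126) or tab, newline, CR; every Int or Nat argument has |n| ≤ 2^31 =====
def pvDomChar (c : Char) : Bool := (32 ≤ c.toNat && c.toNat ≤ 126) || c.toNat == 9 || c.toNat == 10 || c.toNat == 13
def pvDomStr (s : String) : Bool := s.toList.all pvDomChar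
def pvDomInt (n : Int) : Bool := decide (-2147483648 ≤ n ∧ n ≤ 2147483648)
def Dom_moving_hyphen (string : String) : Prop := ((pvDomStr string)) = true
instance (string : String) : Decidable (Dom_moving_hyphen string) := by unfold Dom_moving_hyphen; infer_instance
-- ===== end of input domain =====

-- B replaces A's manual count-and-filter pass by one stable sort keyed on "is not a hyphen" (alternative decomposition, same result).
-- ===== PORT A =====
def moving_hyphen (string : String) : Option String :=
  if string == "" then none
  else
    let st := string.toList.foldl
      (fun (p : Int × List Char) char =>
        if char == '-' then (p.1 + 1, p.2) else (p.1, p.2 ++ [char]))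
      (0, [])
    some (String.ofList (List.replicate st.1.toNat '-' ++ st.2))

-- ===== PORT B =====
-- Python bools False/True sort as the ints 0/1, so the key (c != '-') is ported as 0/1.
def moving_hyphen_alt (string : String) : Option String :=
  if string == "" then none
  else
    some (String.ofList
      (PySem.List.sorted string.toList (fun c => if c = '-' then (0 : Nat) else 1) false))

-- ===== PRECONDITION & SPEC =====
def Spec_moving_hyphen (string : String) (out : Option String) : Prop := out = moving_hyphen_alt string
instance (string : String) (out : Option String) : Decidable (Spec_moving_hyphen string out) := by unfold Spec_moving_hyphen; infer_instance

-- ===== CLAIM (what is proved, stated in full; the proofs are below) =====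
def Claim_equal_moving_hyphen : Prop := ∀ (string : String), Dom_moving_hyphen string → Spec_moving_hyphen string (moving_hyphen string)

-- ===== LEMMAS AND PROOFS =====
-- A's fold accumulates the hyphen count and the filtered characters
lemma foldA (l : List Char) : ∀ (i : Int) (r : List Char),
    l.foldl (fun (p : Int × List Char) char =>
        if char == '-' then (p.1 + 1, p.2) else (p.1, p.2 ++ [char])) (i, r)
      = (i + l.count '-', r ++ l.filter (· != '-')) := by
  induction l with
  | nil => intro i r; simp
  | cons c t ih =>
    intro i r
    by_cases hc : c = '-'
    · subst hc
      have hb : (('-' : Char) == '-') = true := rfl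
      simp only [List.foldl_cons, hb, if_true]
      rw [ih]
      simp
      omega
    · have hb : (c == '-') = false := by simp [hc]
      simp only [List.foldl_cons, hb, Bool.false_eq_true, if_false]
      rw [ih]
      simp [hc]

-- inserting before the first element satisfying `before`
lemma insertBy_middle (before : Char → Char → Bool) (x : Char) :
    ∀ (hs os : List Char), (∀ y ∈ hs, before x y = false) → (∀ y ∈ os, before x y = true) →
    PySem.List.insertBy before x (hs ++ os) = hs ++ x :: os := by
  intro hs
  induction hs with
  | nil =>
    intro os _ hos
    cases os with
    | nil => simp [PySem.List.insertBy]
    | cons o t => simp [PySem.List.insertBy, hos o (by simp)]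
  | cons h t ih =>
    intro os hhs hos
    have hh : before x h = false := hhs h (by simp)
    simp [PySem.List.insertBy, hh, ih os (fun y hy => hhs y (by simp [hy])) hos]

-- the insertion-sort fold with the 0/1 hyphen key stably partitions the list
lemma foldl_ins (l : List Char) : ∀ (hs os : List Char),
    (∀ c ∈ hs, c = '-') → (∀ c ∈ os, c ≠ '-') →
    l.foldl (fun acc x =>
        PySem.List.insertBy
          (fun a b => decide ((if a = '-' then (0 : Nat) else 1) < (if b = '-' then (0 : Nat) else 1)))
          x acc) (hs ++ os)
      = (hs ++ l.filter (· == '-')) ++ (os ++ l.filter (· != '-')) := by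
  induction l with
  | nil => intro hs os _ _; simp
  | cons c t ih =>
    intro hs os hhs hos
    by_cases hc : c = '-'
    · subst hc
      simp only [List.foldl_cons]
      rw [insertBy_middle _ _ hs os
          (fun y hy => by simp [hhs y hy])
          (fun y hy => by simp [hos y hy])]
      have := ih (hs ++ ['-']) os
          (fun d hd => by rcases List.mem_append.1 hd with h | h; exact hhs d h; simpa using h)
          hos
      rw [show hs ++ '-' :: os = (hs ++ ['-']) ++ os by simp] at *
      rw [this]
      simp
    · simp only [List.foldl_cons]
      rw [PySem.List.insertBy_of_forall_not_before _ _ _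
          (fun y hy => by
            rcases List.mem_append.1 hy with h | h
            · simp [hhs y h, hc]
            · simp [hos y h, hc])]
      have := ih hs (os ++ [c]) hhs
          (fun d hd => by
            rcases List.mem_append.1 hd with h | h
            · exact hos d h
            · simp at h; subst h; exact hc)
      rw [show hs ++ os ++ [c] = hs ++ (os ++ [c]) by simp, this]
      simp [hc]

lemma sortedB (l : List Char) :
    PySem.List.sorted l (fun c => if c = '-' then (0 : Nat) else 1) false
      = l.filter (· == '-') ++ l.filter (· != '-') := by
  rw [PySem.List.sorted_eq_foldl_insertBy]
  have := foldl_ins l [] [] (by simp) (by simp)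
  simpa using this

-- ===== VERDICT (by name: the statement is the Claim_ definition above) =====
theorem moving_hyphen_spec : Claim_equal_moving_hyphen := by
  intro string _
  unfold Spec_moving_hyphen moving_hyphen moving_hyphen_alt
  by_cases hs : string = ""
  · simp [hs]
  · have hne : (string == "") = false := by simp [hs]
    simp only [hne, Bool.false_eq_true, if_false]
    rw [foldA, sortedB]
    simp [List.filter_beq]
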